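-- pv_equiv track=rewrite | github.com/Ombhudhara/Skills-Mirage-AI-Workforce-Intelligence-Reskilling-System | skillradar-ai/backend/api/dashboard.py | _estimate_automation
-- ===== SOURCE A (Python) =====
-- def _estimate_automation(role: str) -> int:
--     """Simple heuristic automation risk estimate for dashboard display."""
--     role_lower = role.lower()
--     high_risk = ["data entry", "clerk", "tele", "cashier", "accountant", "receptionist", "typist"]
--     medium_risk = ["analyst", "support", "executive", "admin", "assistant"]
--     low_risk = ["engineer", "developer", "manager", "architect", "scientist", "doctor", "nurse"]
--
--     for kw in high_risk:
--         if kw in role_lower: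
--             return 85
--     for kw in medium_risk:
--         if kw in role_lower:
--             return 55
--     for kw in low_risk:
--         if kw in role_lower:
--             return 25
--     return 50
-- ===== SOURCE B (Python) =====
-- _KEYWORD_SCORES = [
--     ("data entry", 85), ("clerk", 85), ("tele", 85), ("cashier", 85),
--     ("accountant", 85), ("receptionist", 85), ("typist", 85),
--     ("analyst", 55), ("support", 55), ("executive", 55), ("admin", 55), ("assistant", 55),
--     ("engineer", 25), ("developer", 25), ("manager", 25), ("architect", 25),
--     ("scientist", 25), ("doctor", 25), ("nurse", 25),
-- ]
--
--
-- def _estimate_automation(role: str) -> int: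
--     """Gather the tier scores of all matching keywords, then take the best."""
--     role_lower = role.lower()
--     scores = [score for kw, score in _KEYWORD_SCORES if kw in role_lower]
--     return max(scores) if scores else 50
-- ===== Notes on version B (the rewrite author's own statement) =====
-- stated objective: alternative
-- what changed: Replaced the three ordered short-circuit keyword scans (return 85/55/25 at the first hit) by a single (keyword, score) table scanned once, collecting every matching keyword's score and returning max(scores) (or 50 when nothing matches); tier priority is recovered from score magnitude instead of scan order.
import Mathlib
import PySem

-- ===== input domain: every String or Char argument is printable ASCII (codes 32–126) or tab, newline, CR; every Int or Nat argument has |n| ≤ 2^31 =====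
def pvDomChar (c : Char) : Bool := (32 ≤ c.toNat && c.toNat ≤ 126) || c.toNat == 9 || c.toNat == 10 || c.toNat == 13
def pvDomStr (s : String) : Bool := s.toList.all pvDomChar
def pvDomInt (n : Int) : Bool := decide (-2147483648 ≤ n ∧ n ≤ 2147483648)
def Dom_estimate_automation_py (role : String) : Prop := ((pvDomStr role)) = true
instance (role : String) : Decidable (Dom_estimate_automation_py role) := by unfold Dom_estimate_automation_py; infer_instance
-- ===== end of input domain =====

-- B replaces A's three ordered short-circuit scans by one gather-then-max pass over a
-- (keyword, score) table (objective: alternative decomposition; same cost).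

-- ===== PORT A =====
-- 'for kw in kws: if kw in role_lower: return X' — first-match scan with early return
def pvScanA (kws : List String) (role_lower : String) : Bool :=
  match kws with
  | [] => false
  | kw :: rest => if PySem.Str.isIn kw role_lower then true else pvScanA rest role_lower

def estimate_automation_py (role : String) : Int :=
  let role_lower := PySem.Str.lower role
  let high_risk := ["data entry", "clerk", "tele", "cashier", "accountant", "receptionist", "typist"]
  let medium_risk := ["analyst", "support", "executive", "admin", "assistant"]
  let low_risk := ["engineer", "developer", "manager", "architect", "scientist", "doctor", "nurse"]
  if pvScanA high_risk role_lower then 85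
  else if pvScanA medium_risk role_lower then 55
  else if pvScanA low_risk role_lower then 25
  else 50

-- ===== PORT B =====
def pvKeywordScores : List (String × Int) :=
  [("data entry", 85), ("clerk", 85), ("tele", 85), ("cashier", 85),
   ("accountant", 85), ("receptionist", 85), ("typist", 85),
   ("analyst", 55), ("support", 55), ("executive", 55), ("admin", 55), ("assistant", 55),
   ("engineer", 25), ("developer", 25), ("manager", 25), ("architect", 25),
   ("scientist", 25), ("doctor", 25), ("nurse", 25)]

def estimate_automation_py_alt (role : String) : Int :=
  let role_lower := PySem.Str.lower role
  let scores := (pvKeywordScores.filter (fun p => PySem.Str.isIn p.1 role_lower)).map (fun p => p.2)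
  match PySem.List.max? scores (fun x => x) with
  | some m => m
  | none => 50

-- ===== PRECONDITION & SPEC =====
def Spec_estimate_automation_py (role : String) (out : Int) : Prop := out = estimate_automation_py_alt role
instance (role : String) (out : Int) : Decidable (Spec_estimate_automation_py role out) := by unfold Spec_estimate_automation_py; infer_instance

-- ===== CLAIM (what is proved, stated in full; the proofs are below) =====
def Claim_equal_estimate_automation_py : Prop := ∀ (role : String), Dom_estimate_automation_py role → Spec_estimate_automation_py role (estimate_automation_py role)

-- ===== LEMMAS AND PROOFS =====
theorem pvScanA_eq_any (kws : List String) (r : String) :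
    pvScanA kws r = kws.any (fun kw => PySem.Str.isIn kw r) := by
  induction kws with
  | nil => rfl
  | cons k t ih => simp [pvScanA, ih]

theorem pv_filter_map_const {q : String → Bool} (kws : List String) (v : Int) :
    ((kws.map (fun kw => (kw, v))).filter (fun p => q p.1)).map (fun p => p.2)
      = List.replicate (kws.countP q) v := by
  induction kws with
  | nil => rfl
  | cons k t ih =>
      by_cases h : q k <;> simp [h, ih, List.replicate_succ]

theorem pv_foldl_max_replicate (a v : Int) (h : v ≤ a) (n : Nat) :
    (List.replicate n v).foldl max a = a := by
  induction n with
  | zero => rfl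
  | succ m ih => simp [List.replicate_succ, List.foldl_cons, max_eq_left h, ih]

theorem pv_any_eq_true_iff_countP (q : String → Bool) (kws : List String) :
    kws.any q = true ↔ kws.countP q ≠ 0 := by
  rw [List.any_eq_true, Ne, List.countP_eq_zero]
  push Not
  simp

theorem pv_main (role : String) : estimate_automation_py role = estimate_automation_py_alt role := by
  unfold estimate_automation_py estimate_automation_py_alt
  set r := PySem.Str.lower role with hr
  have hsplit : pvKeywordScores =
      (["data entry", "clerk", "tele", "cashier", "accountant", "receptionist", "typist"].map (fun kw => (kw, (85:Int))))
      ++ (["analyst", "support", "executive", "admin", "assistant"].map (fun kw => (kw, (55:Int))))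
      ++ (["engineer", "developer", "manager", "architect", "scientist", "doctor", "nurse"].map (fun kw => (kw, (25:Int)))) := by
    rfl
  simp only [hsplit, List.filter_append, List.map_append,
    pv_filter_map_const (q := fun kw => PySem.Str.isIn kw r)]
  rw [pvScanA_eq_any, pvScanA_eq_any, pvScanA_eq_any]
  set q : String → Bool := fun kw => PySem.Str.isIn kw r with hq
  set n1 := List.countP q ["data entry", "clerk", "tele", "cashier", "accountant", "receptionist", "typist"] with hn1
  set n2 := List.countP q ["analyst", "support", "executive", "admin", "assistant"] with hn2
  set n3 := List.countP q ["engineer", "developer", "manager", "architect", "scientist", "doctor", "nurse"] with hn3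
  rcases Nat.eq_zero_or_pos n1 with h1 | h1
  · rcases Nat.eq_zero_or_pos n2 with h2 | h2
    · rcases Nat.eq_zero_or_pos n3 with h3 | h3
      · -- all empty
        have e1 : (List.any ["data entry", "clerk", "tele", "cashier", "accountant", "receptionist", "typist"] q) = false := by
          rw [← Bool.not_eq_true, pv_any_eq_true_iff_countP]; simp [← hn1, h1]
        have e2 : (List.any ["analyst", "support", "executive", "admin", "assistant"] q) = false := by
          rw [← Bool.not_eq_true, pv_any_eq_true_iff_countP]; simp [← hn2, h2]
        have e3 : (List.any ["engineer", "developer", "manager", "architect", "scientist", "doctor", "nurse"] q) = false := by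
          rw [← Bool.not_eq_true, pv_any_eq_true_iff_countP]; simp [← hn3, h3]
        simp only [e1, e2, e3, Bool.false_eq_true, if_false]
        rw [h1, h2, h3]
        rfl
      · obtain ⟨m, hm⟩ := Nat.exists_eq_succ_of_ne_zero (Nat.pos_iff_ne_zero.mp h3)
        have e1 : (List.any ["data entry", "clerk", "tele", "cashier", "accountant", "receptionist", "typist"] q) = false := by
          rw [← Bool.not_eq_true, pv_any_eq_true_iff_countP]; simp [← hn1, h1]
        have e2 : (List.any ["analyst", "support", "executive", "admin", "assistant"] q) = false := by
          rw [← Bool.not_eq_true, pv_any_eq_true_iff_countP]; simp [← hn2, h2]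
        have e3 : (List.any ["engineer", "developer", "manager", "architect", "scientist", "doctor", "nurse"] q) = true := by
          rw [pv_any_eq_true_iff_countP]; omega
        simp only [e1, e2, e3, Bool.false_eq_true, if_false, if_true]
        rw [h1, h2, hm]
        simp only [List.replicate_zero, List.nil_append, List.replicate_succ, List.cons_append]
        rw [PySem.List.max?_id_cons, pv_foldl_max_replicate 25 25 le_rfl]
    · obtain ⟨m, hm⟩ := Nat.exists_eq_succ_of_ne_zero (Nat.pos_iff_ne_zero.mp h2)
      have e1 : (List.any ["data entry", "clerk", "tele", "cashier", "accountant", "receptionist", "typist"] q) = false := by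
        rw [← Bool.not_eq_true, pv_any_eq_true_iff_countP]; simp [← hn1, h1]
      have e2 : (List.any ["analyst", "support", "executive", "admin", "assistant"] q) = true := by
        rw [pv_any_eq_true_iff_countP]; omega
      simp only [e1, e2, Bool.false_eq_true, if_false, if_true]
      rw [h1, hm]
      simp only [List.replicate_zero, List.nil_append, List.replicate_succ, List.cons_append]
      rw [PySem.List.max?_id_cons]
      rw [List.foldl_append, pv_foldl_max_replicate 55 55 le_rfl, pv_foldl_max_replicate 55 25 (by norm_num)]
  · obtain ⟨m, hm⟩ := Nat.exists_eq_succ_of_ne_zero (Nat.pos_iff_ne_zero.mp h1)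
    have e1 : (List.any ["data entry", "clerk", "tele", "cashier", "accountant", "receptionist", "typist"] q) = true := by
      rw [pv_any_eq_true_iff_countP]; omega
    simp only [e1, if_true]
    rw [hm]
    simp only [List.replicate_succ, List.cons_append]
    rw [PySem.List.max?_id_cons]
    rw [List.foldl_append, List.foldl_append, pv_foldl_max_replicate 85 85 le_rfl,
      pv_foldl_max_replicate 85 55 (by norm_num), pv_foldl_max_replicate 85 25 (by norm_num)]

-- ===== VERDICT (by name: the statement is the Claim_ definition above) =====
theorem estimate_automation_py_spec : Claim_equal_estimate_automation_py := by
  intro role _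
  exact pv_main role
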